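-- pv_equiv track=rewrite | github.com/JasonOnes/LaunchCode | yahtxw.py | sumOfRoll
-- ===== SOURCE A (Python) =====
-- def sumOfRoll(double_list):
--
--     #sum_list = [0 for i in range(len(double_list))]
--     sum_list = []
--     #total = 0
--     for roll in double_list:
--         total = 0
--         for num in roll:
--             total += num
--             #sum_list.append(total)
--             roll_tot = total
--             sum_list.append(roll_tot)
--     # Your code here
--     return sum_list
-- ===== SOURCE B (Python) =====
-- def sumOfRoll(double_list):
--     return [sum(roll[:k + 1]) for roll in double_list for k in range(len(roll))]
-- ===== Notes on version B (the rewrite author's own statement) =====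
-- stated objective: alternative
-- what changed: Replaces the running-total accumulator loop with a flat comprehension that re-sums each prefix roll[:k+1] afresh, keeping no state across iterations.
import Mathlib
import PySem

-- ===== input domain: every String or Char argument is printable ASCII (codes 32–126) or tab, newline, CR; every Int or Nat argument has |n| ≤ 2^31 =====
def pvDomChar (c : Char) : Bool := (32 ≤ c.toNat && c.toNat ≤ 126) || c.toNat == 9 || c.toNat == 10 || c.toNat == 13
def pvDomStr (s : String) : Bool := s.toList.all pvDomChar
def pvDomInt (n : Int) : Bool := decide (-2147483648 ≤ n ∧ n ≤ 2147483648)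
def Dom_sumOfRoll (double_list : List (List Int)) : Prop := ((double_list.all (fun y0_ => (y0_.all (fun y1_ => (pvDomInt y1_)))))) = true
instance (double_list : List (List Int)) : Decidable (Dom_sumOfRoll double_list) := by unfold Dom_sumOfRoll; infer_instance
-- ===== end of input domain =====

-- B replaces A's running-total accumulator with a stateless flat comprehension that re-sums each prefix roll[:k+1]; objective: a genuinely different (alternative) decomposition, not speed.


-- ===== PORT A =====
-- inner loop of A: state (sum_list, total); appends the running total for each num
def sumOfRollInner (st : List Int × Int) (roll : List Int) : List Int × Int :=
  roll.foldl (fun p num =>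
    let total := p.2 + num
    (p.1 ++ [total], total)) st

def sumOfRoll (double_list : List (List Int)) : List Int :=
  double_list.foldl (fun sum_list roll => (sumOfRollInner (sum_list, 0) roll).1) []

-- ===== PORT B =====
-- B: re-sums each prefix roll[:k+1] afresh (no running accumulator)
def sumOfRoll_alt (double_list : List (List Int)) : List Int :=
  double_list.flatMap (fun roll =>
    (List.range roll.length).map (fun (k : Nat) => (PySem.List.slice roll none (some ((k : Int) + 1))).sum))

-- ===== PRECONDITION & SPEC =====
def Spec_sumOfRoll (double_list : List (List Int)) (out : List Int) : Prop := out = sumOfRoll_alt double_list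
instance (double_list : List (List Int)) (out : List Int) : Decidable (Spec_sumOfRoll double_list out) := by unfold Spec_sumOfRoll; infer_instance

-- ===== CLAIM (what is proved, stated in full; the proofs are below) =====
def Claim_equal_sumOfRoll : Prop := ∀ (double_list : List (List Int)), Dom_sumOfRoll double_list → Spec_sumOfRoll double_list (sumOfRoll double_list)

-- ===== LEMMAS AND PROOFS =====

-- ===== VERDICT (by name: the statement is the Claim_ definition above) =====
lemma inner_eq (roll : List Int) (sl : List Int) (t : Int) :
    sumOfRollInner (sl, t) roll
      = (sl ++ (List.range roll.length).map (fun k => t + (roll.take (k+1)).sum), t + roll.sum) := by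
  induction roll generalizing sl t with
  | nil => simp [sumOfRollInner]
  | cons x xs ih =>
    simp only [sumOfRollInner, List.foldl_cons] at *
    rw [ih, Prod.mk.injEq]
    refine ⟨?_, by rw [List.sum_cons]; ring⟩
    rw [List.length_cons, List.range_succ_eq_map]
    simp [List.map_map, Function.comp, add_assoc, List.append_assoc]

lemma alt_elem (roll : List Int) (k : Nat) :
    (PySem.List.slice roll none (some ((k : Int) + 1))).sum = (roll.take (k+1)).sum := by
  have : ((k : Int) + 1) = ((k + 1 : Nat) : Int) := by push_cast; ring
  rw [this, PySem.List.slice_to_natCast]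

theorem sumOfRoll_spec : Claim_equal_sumOfRoll := by
  intro dl _
  unfold Spec_sumOfRoll sumOfRoll sumOfRoll_alt
  have H : ∀ (dl : List (List Int)) (sl : List Int),
      dl.foldl (fun sum_list roll => (sumOfRollInner (sum_list, 0) roll).1) sl
        = sl ++ dl.flatMap (fun roll =>
            (List.range roll.length).map (fun (k : Nat) => (PySem.List.slice roll none (some ((k : Int) + 1))).sum)) := by
    intro dl
    induction dl with
    | nil => simp
    | cons r rs ih =>
      intro sl
      simp only [List.foldl_cons, List.flatMap_cons]
      rw [show ((sumOfRollInner (sl, 0) r).1)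
            = sl ++ (List.range r.length).map (fun k => (0:Int) + (r.take (k+1)).sum) from by
          rw [inner_eq], ih]
      simp [alt_elem, List.flatMap]
  simpa using H dl []
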